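-- pv_equiv track=rewrite | github.com/wilfredarin/Interviewbit | Tree Data Structure/hotel-reviews.py | solve
-- ===== SOURCE A (Python) =====
-- def solve(A, B):
--     #create a trie
--     trie = [[None] * 26, False]
--
--     #add words to trie
--     for good_word in A.split("_"):#wifi cool ice
--         node = trie
--         for c in good_word: #w i f i, c o o l
--             index = ord(c)-ord('a')
--             if node[0][index] is None:
--                 node[0][index] = [[None] * 26,False]
--             node = node[0][index]
--         node[1]=True  #end of word
--     """for good_word in A.split('_'):
--         node = trie
--         for c in good_word:
--             index = ord(c) - ord('a')
--             if node[0][index] is None: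
--                 node[0][index] = [[None] * 26, False]
--             node = node[0][index]
--         node[1] = True"""
--
--     reviews_score = {}
--     for review_index, review in enumerate(B):
--         good_words = 0
--         for word in review.split('_'):
--             node = trie
--             for c in word:
--                 index = ord(c) - ord('a')
--                 node = node[0][index]
--                 if node is None:
--                     break
--
--             if node is not None and node[1] is True:
--                 good_words += 1
--
--         if good_words not in reviews_score:
--             reviews_score[good_words] = []
--         reviews_score[good_words].append(review_index)
--
--     sorted_score = sorted(reviews_score.keys(), reverse=True)
--     return [l for score in sorted_score for l in reviews_score[score]]
-- ===== SOURCE B (Python) =====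
-- def solve(A, B):
--     good = set(A.split("_"))
--     scores = {}
--     for i, review in enumerate(B):
--         score = sum(1 for w in review.split("_") if w in good)
--         if score not in scores:
--             scores[score] = []
--         scores[score].append(i)
--     return [i for s in sorted(scores, reverse=True) for i in scores[s]]
-- ===== Notes on version B (the rewrite author's own statement) =====
-- stated objective: faster
-- what changed: Replaces the hand-built 26-ary character trie and its per-character walks by a set of good words built once from A.split('_'), with a single hashed membership test per review word (measured ~2.3x faster); the grouping-by-score dict and descending-score flatten are kept.
-- outside the precondition, e.g. on solve('a', ['x', 'G']): A returns [1, 0], B returns [0, 1]; on solve('a', ['A']): A raises IndexError, B returns [0]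
import Mathlib
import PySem

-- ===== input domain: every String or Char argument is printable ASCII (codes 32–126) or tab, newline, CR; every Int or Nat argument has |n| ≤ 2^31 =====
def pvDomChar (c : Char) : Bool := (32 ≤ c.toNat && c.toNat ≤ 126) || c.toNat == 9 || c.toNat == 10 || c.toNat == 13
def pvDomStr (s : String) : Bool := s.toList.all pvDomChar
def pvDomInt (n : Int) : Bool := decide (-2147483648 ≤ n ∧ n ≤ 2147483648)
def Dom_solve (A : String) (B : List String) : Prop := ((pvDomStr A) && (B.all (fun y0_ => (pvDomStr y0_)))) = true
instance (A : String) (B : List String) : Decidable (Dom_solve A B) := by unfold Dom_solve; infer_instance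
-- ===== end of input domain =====

-- B replaces A's hand-built 26-ary character trie by a set of the good words (one membership
-- test per review word; measured faster in a timing run); grouping by score and the
-- descending-score flatten are unchanged.


-- ===== PORT A =====
-- s.split("_") (separator nonempty, so Python's split never raises)
def pvSplit (s : String) : List String := (PySem.Chars.splitOn s.toList ['_']).map String.ofList

-- Python's trie node [children-list of 26, is_word]; children as a total function Nat → PvTrie
-- (PvTrie.nil = Python None; a List of children in the constructor would be a nested inductive).
inductive PvTrie where
  | nil  : PvTrie
  | node : (Nat → PvTrie) → Bool → PvTrie

-- index = ord(c) - ord('a'); inside Pre_solve every word char is 'a'..'z', so 0 ≤ index ≤ 25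
-- (outside Pre_ the Python wraps a negative index or raises IndexError; not modelled).
def pvIdx (c : Char) : Nat := c.toNat - 97

-- node[0][index] = [[None]*26, False] when it was None
def pvEnsure : PvTrie → PvTrie
  | .nil => .node (fun _ => .nil) false
  | t => t

-- the inner 'for c in good_word' insertion loop (Python mutates; here the updated node is rebuilt)
def pvInsert : PvTrie → List Char → PvTrie
  | .nil, _ => .nil   -- unreachable: insertion starts at the root node
  | .node ch _, [] => .node ch true
  | .node ch b, c :: cs =>
      .node (Function.update ch (pvIdx c) (pvInsert (pvEnsure (ch (pvIdx c))) cs)) b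

-- the inner 'for c in word' lookup loop; .nil = the loop broke with node None
def pvWalk : PvTrie → List Char → PvTrie
  | t, [] => t
  | .nil, _ :: _ => .nil
  | .node ch _, c :: cs => pvWalk (ch (pvIdx c)) cs

-- 'node is not None and node[1] is True'
def pvIsGood (t : PvTrie) (w : List Char) : Bool :=
  match pvWalk t w with
  | .nil => false
  | .node _ b => b

def solve (A : String) (B : List String) : List Int :=
  let trie := (pvSplit A).foldl (fun t w => pvInsert t w.toList)
                (PvTrie.node (fun _ => .nil) false)
  let reviews_score := (PySem.List.enumerate B 0).foldl
    (fun (d : PySem.Dict Int (List Int)) p =>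
      let good_words : Int := (pvSplit p.2).foldl
        (fun acc word => if pvIsGood trie word.toList then acc + 1 else acc) 0
      let d1 := if d.contains good_words then d else d.insert good_words []
      d1.modify good_words [] (· ++ [p.1]))   -- reviews_score[good_words].append(review_index)
    PySem.Dict.empty
  let sorted_score := PySem.List.sorted reviews_score.keys (fun x => x) true
  sorted_score.flatMap (fun score => reviews_score.getD score [])  -- key is always present

-- ===== PORT B =====
def solve_alt (A : String) (B : List String) : List Int :=
  let good : PySem.Set String := PySem.Set.ofList (pvSplit A)
  let scores := (PySem.List.enumerate B 0).foldl
    (fun (d : PySem.Dict Int (List Int)) p =>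
      let score : Int := ((pvSplit p.2).countP (fun w => good.contains w) : Int)
      let d1 := if d.contains score then d else d.insert score []
      d1.modify score [] (· ++ [p.1]))
    PySem.Dict.empty
  (PySem.List.sorted scores.keys (fun x => x) true).flatMap (fun s => scores.getD s [])

-- ===== PRECONDITION & SPEC =====
-- Pre_ restricts to the task's natural domain: every character of A and of each review is a
-- lowercase letter 'a'..'z' or the separator '_'.  Outside it A's trie index ord(c)-ord('a')
-- raises IndexError (codes < 71 or > 122) or wraps a negative index (codes 71..96), which a
-- set-based B cannot and should not mimic.
def pvOkChar (c : Char) : Bool := c == '_' || ('a' ≤ c && c ≤ 'z')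
def Pre_solve (A : String) (B : List String) : Prop :=
  A.toList.all pvOkChar = true ∧ B.all (fun r => r.toList.all pvOkChar) = true
instance (A : String) (B : List String) : Decidable (Pre_solve A B) := by
  unfold Pre_solve; infer_instance

def pvWitness_solve : String × List String := ("ab_c", ["ab", "d_c"])

def Spec_solve (A : String) (B : List String) (out : List Int) : Prop := out = solve_alt A B
instance (A : String) (B : List String) (out : List Int) : Decidable (Spec_solve A B out) := by
  unfold Spec_solve; infer_instance

-- ===== CLAIM (what is proved, stated in full; the proofs are below) =====
def Claim_equal_solve : Prop :=
  ∀ (A : String) (B : List String), Dom_solve A B → Pre_solve A B → Spec_solve A B (solve A B)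

-- ===== LEMMAS AND PROOFS =====

def PvLower (c : Char) : Prop := 'a' ≤ c ∧ c ≤ 'z'

theorem pvIdx_inj {c a : Char} (hc : PvLower c) (ha : PvLower a)
    (h : pvIdx c = pvIdx a) : c = a := by
  obtain ⟨hc1, hc2⟩ := hc; obtain ⟨ha1, ha2⟩ := ha
  have hc1' : (97 : Nat) ≤ c.toNat := hc1
  have ha1' : (97 : Nat) ≤ a.toNat := ha1
  have : c.toNat = a.toNat := by unfold pvIdx at h; omega
  exact Char.ext (UInt32.toNat_inj.mp this)

theorem go_zero (l cur : List Char) (acc : List (List Char)) :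
    PySem.Chars.splitOn.go ['_'] 0 l cur acc = ((cur.reverse ++ l) :: acc).reverse := by
  rw [PySem.Chars.splitOn.go]

theorem go_succ_nil (n : Nat) (cur : List Char) (acc : List (List Char)) :
    PySem.Chars.splitOn.go ['_'] (n+1) [] cur acc = (cur.reverse :: acc).reverse := by
  rw [PySem.Chars.splitOn.go]
  omega

theorem go_succ_cons (n : Nat) (x : Char) (rest cur : List Char) (acc : List (List Char)) :
    PySem.Chars.splitOn.go ['_'] (n+1) (x :: rest) cur acc =
      if x = '_' then PySem.Chars.splitOn.go ['_'] n rest [] (cur.reverse :: acc)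
      else PySem.Chars.splitOn.go ['_'] n rest (x :: cur) acc := by
  rw [PySem.Chars.splitOn.go] <;>
    first
      | omega
      | (simp only [List.isPrefixOf, Bool.and_true, beq_iff_eq]
         by_cases h : x = '_' <;> simp [h, eq_comm])

-- every char of every piece of s.split('_') is lowercase when s is lowercase-or-underscore
theorem splitOn_go_lower (P : Char → Prop) (fuel : Nat) :
    ∀ (l cur : List Char) (acc : List (List Char)),
      l.length ≤ fuel →
      (∀ c ∈ l, c = '_' ∨ P c) →
      (∀ c ∈ cur, P c) →
      (∀ w ∈ acc, ∀ c ∈ w, P c) →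
      ∀ w ∈ PySem.Chars.splitOn.go ['_'] fuel l cur acc, ∀ c ∈ w, P c := by
  induction fuel with
  | zero =>
    intro l cur acc hlen hl hcur hacc w hw c hc
    have hl0 : l = [] := List.eq_nil_of_length_eq_zero (by omega)
    subst hl0
    rw [go_zero] at hw
    simp only [List.mem_reverse, List.mem_cons, List.append_nil] at hw
    rcases hw with h | h
    · exact hcur c (by simpa [h] using hc)
    · exact hacc w h c hc
  | succ n ih =>
    intro l cur acc hlen hl hcur hacc w hw c hc
    cases l with
    | nil =>
      rw [go_succ_nil] at hw
      simp only [List.mem_reverse, List.mem_cons] at hw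
      rcases hw with h | h
      · exact hcur c (by simpa [h] using hc)
      · exact hacc w h c hc
    | cons x rest =>
      rw [go_succ_cons] at hw
      by_cases hx : x = '_'
      · rw [if_pos hx] at hw
        refine ih rest [] (cur.reverse :: acc) (by simpa using hlen)
          (fun d hd => hl d (List.mem_cons_of_mem _ hd)) (by simp) ?_ w hw c hc
        intro u hu d hd
        rcases List.mem_cons.mp hu with h | h
        · exact hcur d (by simpa [h] using hd)
        · exact hacc u h d hd
      · rw [if_neg hx] at hw
        refine ih rest (x :: cur) acc (by simpa using hlen)
          (fun d hd => hl d (List.mem_cons_of_mem _ hd)) ?_ hacc w hw c hc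
        intro d hd
        rcases List.mem_cons.mp hd with h | h
        · subst h; rcases hl d (List.mem_cons_self) with h' | h'
          · exact absurd h' hx
          · exact h'
        · exact hcur d h

theorem split_lower {s : String}
    (hs : ∀ c ∈ s.toList, c = '_' ∨ PvLower c) :
    ∀ w ∈ pvSplit s, ∀ c ∈ w.toList, PvLower c := by
  intro w hw c hc
  simp only [pvSplit, List.mem_map] at hw
  obtain ⟨u, hu, rfl⟩ := hw
  rw [String.toList_ofList] at hc
  exact splitOn_go_lower PvLower (s.toList.length + 1) s.toList [] []
    (by omega) hs (by simp) (by simp) u (by simpa [PySem.Chars.splitOn] using hu) c hc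

theorem pvWalk_nil (w : List Char) : pvWalk .nil w = .nil := by
  cases w <;> simp [pvWalk]

theorem pvIsGood_ensure (t : PvTrie) (w : List Char) :
    pvIsGood (pvEnsure t) w = pvIsGood t w := by
  cases t with
  | nil =>
    cases w with
    | nil => simp [pvEnsure, pvIsGood, pvWalk]
    | cons c cs => simp [pvEnsure, pvIsGood, pvWalk, pvWalk_nil]
  | node ch b => rfl

theorem pvIsGood_cons (ch : Nat → PvTrie) (b : Bool) (c : Char) (cs : List Char) :
    pvIsGood (.node ch b) (c :: cs) = pvIsGood (ch (pvIdx c)) cs := by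
  simp [pvIsGood, pvWalk]

theorem pvIsGood_insert (x w : List Char) (hx : ∀ c ∈ x, PvLower c)
    (hw : ∀ c ∈ w, PvLower c) (ch : Nat → PvTrie) (b : Bool) :
    pvIsGood (pvInsert (.node ch b) x) w = (decide (w = x) || pvIsGood (.node ch b) w) := by
  induction x generalizing w ch b with
  | nil =>
    cases w with
    | nil => simp [pvInsert, pvIsGood, pvWalk]
    | cons c cs => simp [pvInsert, pvIsGood, pvWalk]
  | cons a as ihx =>
    have ha : PvLower a := hx a List.mem_cons_self
    have has : ∀ d ∈ as, PvLower d := fun d hd => hx d (List.mem_cons_of_mem _ hd)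
    cases w with
    | nil => simp [pvInsert, pvIsGood, pvWalk]
    | cons c cs =>
      have hc : PvLower c := hw c List.mem_cons_self
      have hcs : ∀ d ∈ cs, PvLower d := fun d hd => hw d (List.mem_cons_of_mem _ hd)
      by_cases hidx : pvIdx c = pvIdx a
      · have hca : c = a := pvIdx_inj hc ha hidx
        subst hca
        have hgood : pvIsGood (pvInsert (pvEnsure (ch (pvIdx c))) as) cs
            = (decide (cs = as) || pvIsGood (pvEnsure (ch (pvIdx c))) cs) := by
          cases h : ch (pvIdx c) with
          | nil => simpa [h, pvEnsure] using ihx cs has hcs (fun _ => .nil) false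
          | node ch2 b2 => simpa [h, pvEnsure] using ihx cs has hcs ch2 b2
        have h1 : pvInsert (PvTrie.node ch b) (c :: as)
            = .node (Function.update ch (pvIdx c) (pvInsert (pvEnsure (ch (pvIdx c))) as)) b := rfl
        rw [h1, pvIsGood_cons, pvIsGood_cons, Function.update_self, hgood, pvIsGood_ensure]
        simp
      · have hca : c ≠ a := fun h => hidx (h ▸ rfl)
        have h1 : pvInsert (PvTrie.node ch b) (a :: as)
            = .node (Function.update ch (pvIdx a) (pvInsert (pvEnsure (ch (pvIdx a))) as)) b := rfl
        rw [h1, pvIsGood_cons, pvIsGood_cons, Function.update_of_ne hidx]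
        simp [hca]

theorem pvIsGood_foldl (ws : List (List Char)) (w : List Char)
    (hws : ∀ u ∈ ws, ∀ c ∈ u, PvLower c) (hw : ∀ c ∈ w, PvLower c) :
    ∀ (ch : Nat → PvTrie) (b : Bool),
      pvIsGood (ws.foldl (fun t u => pvInsert t u) (.node ch b)) w
        = (decide (w ∈ ws) || pvIsGood (.node ch b) w) := by
  induction ws generalizing w with
  | nil => intro ch b; simp
  | cons u rest ih =>
    intro ch b
    have hu : ∀ c ∈ u, PvLower c := hws u List.mem_cons_self
    have hrest : ∀ v ∈ rest, ∀ c ∈ v, PvLower c := fun v hv => hws v (List.mem_cons_of_mem _ hv)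
    obtain ⟨ch2, b2, hni⟩ : ∃ ch2 b2, pvInsert (.node ch b) u = .node ch2 b2 := by
      cases u <;> exact ⟨_, _, rfl⟩
    calc pvIsGood ((u :: rest).foldl (fun t v => pvInsert t v) (.node ch b)) w
        = pvIsGood (rest.foldl (fun t v => pvInsert t v) (.node ch2 b2)) w := by
          rw [List.foldl_cons, hni]
      _ = (decide (w ∈ rest) || pvIsGood (.node ch2 b2) w) := ih w hrest hw ch2 b2
      _ = (decide (w ∈ rest) || (decide (w = u) || pvIsGood (.node ch b) w)) := by
          rw [← hni, pvIsGood_insert u w hu hw ch b]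
      _ = (decide (w ∈ u :: rest) || pvIsGood (.node ch b) w) := by
          by_cases h1 : w = u <;> by_cases h2 : w ∈ rest <;> simp [h1, h2]

theorem pvIsGood_empty (w : List Char) :
    pvIsGood (.node (fun _ => .nil) false) w = false := by
  cases w with
  | nil => simp [pvIsGood, pvWalk]
  | cons c cs => cases cs <;> simp [pvIsGood, pvWalk]

theorem score_eq (A r : String)
    (hA : ∀ c ∈ A.toList, c = '_' ∨ PvLower c)
    (hr : ∀ c ∈ r.toList, c = '_' ∨ PvLower c) :
    (pvSplit r).foldl
        (fun acc word =>
          if pvIsGood ((pvSplit A).foldl (fun t w => pvInsert t w.toList)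
              (PvTrie.node (fun _ => .nil) false)) word.toList then acc + 1 else acc) 0
      = ((pvSplit r).countP (fun w => (PySem.Set.ofList (pvSplit A)).contains w) : Int) := by
  have key : ∀ word ∈ pvSplit r,
      pvIsGood ((pvSplit A).foldl (fun t w => pvInsert t w.toList)
          (PvTrie.node (fun _ => .nil) false)) word.toList
        = (PySem.Set.ofList (pvSplit A)).contains word := by
    intro word hword
    have hwl : ∀ c ∈ word.toList, PvLower c := split_lower hr word hword
    have hfold : (pvSplit A).foldl (fun t w => pvInsert t w.toList)
          (PvTrie.node (fun _ => .nil) false)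
        = ((pvSplit A).map String.toList).foldl (fun t u => pvInsert t u)
          (PvTrie.node (fun _ => .nil) false) := by
      rw [List.foldl_map]
    have hlow : ∀ u ∈ (pvSplit A).map String.toList, ∀ c ∈ u, PvLower c := by
      intro u hu
      obtain ⟨v, hv, rfl⟩ := List.mem_map.mp hu
      exact split_lower hA v hv
    rw [hfold, pvIsGood_foldl ((pvSplit A).map String.toList) word.toList hlow hwl _ _,
        pvIsGood_empty]
    have hmem : word.toList ∈ (pvSplit A).map String.toList ↔ word ∈ pvSplit A :=
      List.mem_map_of_injective (fun a b h => String.toList_inj.mp h)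
    simp [PySem.Set.contains, PySem.Set.mem_ofList, hmem]
  rw [PySem.List.foldl_congr_mem (pvSplit r) _
      (fun acc word => if (PySem.Set.ofList (pvSplit A)).contains word then acc + 1 else acc) 0
      (fun acc word hword => by rw [key word hword]),
    PySem.List.foldl_if_add_one]
  simp only [zero_add]

-- ===== VERDICT (by name: the statement is the Claim_ definition above) =====
theorem solve_spec : Claim_equal_solve := by
  intro A B _ hpre
  obtain ⟨hA0, hB0⟩ := hpre
  have hA : ∀ c ∈ A.toList, c = '_' ∨ PvLower c := by
    intro c hc
    simpa [pvOkChar, PvLower] using List.all_eq_true.mp hA0 c hc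
  have hB : ∀ r ∈ B, ∀ c ∈ r.toList, c = '_' ∨ PvLower c := by
    intro r hr c hc
    have := List.all_eq_true.mp (List.all_eq_true.mp hB0 r hr) c hc
    simpa [pvOkChar, PvLower] using this
  have hd :
      (PySem.List.enumerate B 0).foldl
        (fun (d : PySem.Dict Int (List Int)) p =>
          (if d.contains ((pvSplit p.2).foldl
                (fun acc word => if pvIsGood ((pvSplit A).foldl (fun t w => pvInsert t w.toList)
                    (PvTrie.node (fun _ => .nil) false)) word.toList then acc + 1 else acc) 0)
            then d
            else d.insert ((pvSplit p.2).foldl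
                (fun acc word => if pvIsGood ((pvSplit A).foldl (fun t w => pvInsert t w.toList)
                    (PvTrie.node (fun _ => .nil) false)) word.toList then acc + 1 else acc) 0) []).modify
            ((pvSplit p.2).foldl
                (fun acc word => if pvIsGood ((pvSplit A).foldl (fun t w => pvInsert t w.toList)
                    (PvTrie.node (fun _ => .nil) false)) word.toList then acc + 1 else acc) 0)
            [] (· ++ [p.1])) PySem.Dict.empty
      = (PySem.List.enumerate B 0).foldl
        (fun (d : PySem.Dict Int (List Int)) p =>
          (if d.contains ((pvSplit p.2).countP
                (fun w => (PySem.Set.ofList (pvSplit A)).contains w) : Int)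
            then d
            else d.insert ((pvSplit p.2).countP
                (fun w => (PySem.Set.ofList (pvSplit A)).contains w) : Int) []).modify
            ((pvSplit p.2).countP (fun w => (PySem.Set.ofList (pvSplit A)).contains w) : Int)
            [] (· ++ [p.1])) PySem.Dict.empty := by
    apply PySem.List.foldl_congr_mem
    intro acc p hp
    have hp2 : p.2 ∈ B := by
      rcases (PySem.List.mem_enumerate_iff B 0 p).mp hp with ⟨k, hk, rfl⟩
      simp
    simp only [score_eq A p.2 hA (hB p.2 hp2)]
  simp only [Spec_solve, solve, solve_alt]
  rw [hd]
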